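-- pv_equiv track=rewrite | github.com/aarre/twh | src/twh/time_log.py | project_rollups
-- ===== SOURCE A (Python) =====
-- from typing import Any, Dict, Iterable, List, Optional, Sequence, Tuple
--
-- def project_rollups(project: Optional[str]) -> List[str]:
--     """
--     Return hierarchical project rollups.
--
--     Parameters
--     ----------
--     project : Optional[str]
--         Project name.
--
--     Returns
--     -------
--     List[str]
--         Project rollup list.
--
--     Examples
--     --------
--     >>> project_rollups("alpha.beta")
--     ['alpha', 'alpha.beta']
--     >>> project_rollups(None)
--     ['-']
--     """
--     if not project:
--         return ["-"]
--     parts = [part for part in project.split(".") if part]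
--     rollups: List[str] = []
--     for idx in range(1, len(parts) + 1):
--         rollups.append(".".join(parts[:idx]))
--     return rollups if rollups else ["-"]
-- ===== SOURCE B (Python) =====
-- def project_rollups(project):
--     """Single pass with a running prefix instead of re-joining a slice per index."""
--     if not project:
--         return ["-"]
--     rollups = []
--     prefix = ""
--     for part in project.split("."):
--         if not part:
--             continue
--         prefix = part if not rollups else prefix + "." + part
--         rollups.append(prefix)
--     return rollups if rollups else ["-"]
-- ===== Notes on version B (the rewrite author's own statement) =====
-- stated objective: simpler
-- what changed: Replaces the indexed loop that re-joins the slice parts[:idx] for every idx with a single pass over the split pieces that maintains one running dot-separated prefix, appending it as each non-empty part is consumed.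
import Mathlib
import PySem

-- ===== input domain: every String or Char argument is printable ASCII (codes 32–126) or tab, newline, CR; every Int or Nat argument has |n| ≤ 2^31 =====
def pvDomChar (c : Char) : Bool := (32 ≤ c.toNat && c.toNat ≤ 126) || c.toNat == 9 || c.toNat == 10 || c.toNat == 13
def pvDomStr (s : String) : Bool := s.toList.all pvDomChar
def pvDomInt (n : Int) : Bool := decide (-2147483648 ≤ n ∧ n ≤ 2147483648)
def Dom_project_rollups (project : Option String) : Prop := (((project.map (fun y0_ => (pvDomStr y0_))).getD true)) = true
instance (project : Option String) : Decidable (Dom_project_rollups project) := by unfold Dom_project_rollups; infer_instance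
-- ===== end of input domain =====

-- B replaces A's per-index re-join of the slice parts[:idx] by a single pass keeping one
-- running dot-separated prefix (objective: simpler).

-- ===== PORT A =====
def project_rollups (project : Option String) : List String :=
  match project with
  | none => ["-"]                               -- 'if not project' fires on None
  | some s =>
    if s = "" then ["-"]                        -- …and on the empty string
    else
      -- parts = [part for part in project.split(".") if part]; sep "." ≠ "" so split? is always some
      let parts := ((PySem.Str.split? s ".").getD []).filter (fun part => part ≠ "")
      -- for idx in range(1, len(parts) + 1): rollups.append(".".join(parts[:idx]))
      let rollups := (PySem.List.pyRange 1 (PySem.List.len parts + 1) 1).foldl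
        (fun acc idx => acc ++ [PySem.Str.join "." (PySem.List.slice parts none (some idx))]) []
      if rollups = [] then ["-"] else rollups

-- ===== PORT B =====
-- one iteration of B's loop: skip empty parts, extend the running prefix, append it
def pvBStep (st : List String × String) (part : String) : List String × String :=
  if part = "" then st
  else
    let pre := if st.1 = [] then part else st.2 ++ "." ++ part
    (st.1 ++ [pre], pre)

def project_rollups_alt (project : Option String) : List String :=
  match project with
  | none => ["-"]
  | some s =>
    if s = "" then ["-"]
    else
      let st := ((PySem.Str.split? s ".").getD []).foldl pvBStep ([], "")
      if st.1 = [] then ["-"] else st.1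

-- ===== PRECONDITION & SPEC =====
def Spec_project_rollups (project : Option String) (out : List String) : Prop := out = project_rollups_alt project
instance (project : Option String) (out : List String) : Decidable (Spec_project_rollups project out) := by unfold Spec_project_rollups; infer_instance

-- ===== CLAIM (what is proved, stated in full; the proofs are below) =====
def Claim_equal_project_rollups : Prop := ∀ (project : Option String), Dom_project_rollups project → Spec_project_rollups project (project_rollups project)

-- ===== LEMMAS AND PROOFS =====

-- A's result over a part list, in map form
def pvRollA (ps : List String) : List String :=
  (List.range ps.length).map (fun k => PySem.Str.join "." (ps.take (k + 1)))

-- "." join of a list extended on the right, for a non-empty list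
lemma pv_chars_join_append_singleton (sep : List Char) (ps : List (List Char)) (p : List Char)
    (h : ps ≠ []) :
    PySem.Chars.join sep (ps ++ [p]) = PySem.Chars.join sep ps ++ sep ++ p := by
  induction ps with
  | nil => simp at h
  | cons q qs ih =>
    cases qs with
    | nil => simp [PySem.Chars.join_cons_cons, PySem.Chars.join_singleton]
    | cons r rs =>
      have ih' := ih (by simp)
      simp only [List.cons_append] at ih' ⊢
      rw [PySem.Chars.join_cons_cons, PySem.Chars.join_cons_cons, ih']
      simp [List.append_assoc]

lemma pv_join_append_singleton (sep : String) (ps : List String) (p : String) (h : ps ≠ []) :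
    PySem.Str.join sep (ps ++ [p]) = PySem.Str.join sep ps ++ sep ++ p := by
  apply String.toList_inj.mp
  simp only [PySem.Str.toList_join, String.toList_append, List.map_append, List.map_cons,
    List.map_nil]
  exact pv_chars_join_append_singleton sep.toList (ps.map String.toList) p.toList (by simp [h])

lemma pv_join_singleton (sep p : String) : PySem.Str.join sep [p] = p := by
  apply String.toList_inj.mp
  simp [PySem.Str.toList_join, PySem.Chars.join_singleton]

-- A's map form extended on the right by one part
lemma pv_rollA_append (ps : List String) (p : String) :
    pvRollA (ps ++ [p]) = pvRollA ps ++ [PySem.Str.join "." (ps ++ [p])] := by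
  unfold pvRollA
  rw [show (ps ++ [p]).length = ps.length + 1 by simp, List.range_succ, List.map_append]
  congr 1
  · apply List.map_congr_left
    intro k hk
    rw [List.mem_range] at hk
    rw [List.take_append_of_le_length (by omega)]
  · rw [List.map_singleton, List.take_of_length_le (by simp)]

-- skipping empty parts in the fold is folding over the filtered list
lemma pv_foldl_filter (xs : List String) (st : List String × String) :
    xs.foldl pvBStep st = (xs.filter (fun part => part ≠ "")).foldl pvBStep st := by
  induction xs generalizing st with
  | nil => rfl
  | cons x xs ih =>
    by_cases hx : x = "" <;> simp [hx, pvBStep, ih]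

-- the running-prefix invariant of B's loop over non-empty parts
lemma pv_main (ps : List String) (h : ∀ p ∈ ps, p ≠ "") :
    ps.foldl pvBStep ([], "") = (pvRollA ps, PySem.Str.join "." ps) := by
  induction ps using List.reverseRecOn with
  | nil => rfl
  | append_singleton ps p ih =>
    have hp : p ≠ "" := h p (by simp)
    have hps : ∀ q ∈ ps, q ≠ "" := fun q hq => h q (by simp [hq])
    rw [List.foldl_append, ih hps, List.foldl_cons, List.foldl_nil]
    cases ps with
    | nil => simp [pvBStep, hp, pvRollA, pv_join_singleton]
    | cons q qs =>
      have hne : pvRollA (q :: qs) ≠ [] := by simp [pvRollA, List.range_succ_eq_map]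
      have hjoin := pv_join_append_singleton "." (q :: qs) p (by simp)
      simp only [pvBStep, if_neg hp, if_neg hne]
      rw [pv_rollA_append, hjoin]

-- A's explicit fold computes pvRollA of the filtered parts
lemma pv_acore (parts : List String) :
    (PySem.List.pyRange 1 (PySem.List.len parts + 1) 1).foldl
      (fun acc idx => acc ++ [PySem.Str.join "." (PySem.List.slice parts none (some idx))]) []
    = pvRollA parts := by
  rw [PySem.List.foldl_append_singleton_eq_map, PySem.List.pyRange_one]
  simp only [PySem.List.len_eq, List.nil_append, List.map_map]
  rw [show ((parts.length : Int) + 1 - 1).toNat = parts.length by omega]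
  apply List.map_congr_left
  intro k hk
  simp only [Function.comp_apply]
  rw [show (1 : Int) + (k : Int) = ((k + 1 : Nat) : Int) by push_cast; ring,
      PySem.List.slice_to_natCast]

-- Python's split with sep "." never raises
lemma pv_split_some (s : String) : ∃ ps, PySem.Str.split? s "." = some ps := by
  have h := PySem.Str.split?_map s "."
  cases hs : PySem.Str.split? s "." with
  | some ps => exact ⟨ps, rfl⟩
  | none => rw [hs] at h; simp [PySem.Chars.split?] at h

-- ===== VERDICT (by name: the statement is the Claim_ definition above) =====
theorem project_rollups_spec : Claim_equal_project_rollups := by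
  intro project _
  unfold Spec_project_rollups project_rollups project_rollups_alt
  cases project with
  | none => rfl
  | some s =>
    by_cases hs : s = ""
    · simp [hs]
    · simp only [if_neg hs]
      obtain ⟨xs, hxs⟩ := pv_split_some s
      rw [hxs]
      simp only [Option.getD_some]
      rw [pv_foldl_filter, pv_main (xs.filter (fun part => part ≠ ""))
            (by intro p hp; simpa using (List.of_mem_filter hp)), pv_acore]
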